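-- pv_equiv track=rewrite | github.com/keyiadiannao/mamba2.1 | scripts/run_nav/train_learned_router.py | _group_row_indices
-- ===== SOURCE A (Python) =====
-- from collections import defaultdict
--
-- def _group_row_indices(rows: list[dict[str, object]]) -> dict[tuple[str, str], list[int]]:
--     groups: dict[tuple[str, str], list[int]] = defaultdict(list)
--     for index, row in enumerate(rows):
--         key = (str(row.get("sample_id", "")), str(row.get("parent_node_id", "")))
--         groups[key].append(index)
--     ordered: dict[tuple[str, str], list[int]] = {}
--     for key, indices in groups.items():
--         ordered[key] = sorted(indices, key=lambda i: str(rows[i].get("child_node_id", "")))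
--     return ordered
-- ===== SOURCE B (Python) =====
-- def _group_row_indices(rows: list[dict[str, object]]) -> dict[tuple[str, str], list[int]]:
--     # One global stable sort of all row indices by child id, then a single
--     # distributing pass; per-group lists come out child-sorted by stability.
--     order = sorted(range(len(rows)), key=lambda i: str(rows[i].get("child_node_id", "")))
--     out: dict[tuple[str, str], list[int]] = {}
--     for row in rows:
--         key = (str(row.get("sample_id", "")), str(row.get("parent_node_id", "")))
--         if key not in out:
--             out[key] = []
--     for i in order:
--         row = rows[i]
--         out[(str(row.get("sample_id", "")), str(row.get("parent_node_id", "")))].append(i)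
--     return out
-- ===== Notes on version B (the rewrite author's own statement) =====
-- stated objective: alternative
-- what changed: A sorts each key-group separately after grouping; B performs one global stable sort of all row indices by child id and then distributes indices into pre-seeded groups in a single pass, relying on sort stability for identical per-group order.
import Mathlib
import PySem

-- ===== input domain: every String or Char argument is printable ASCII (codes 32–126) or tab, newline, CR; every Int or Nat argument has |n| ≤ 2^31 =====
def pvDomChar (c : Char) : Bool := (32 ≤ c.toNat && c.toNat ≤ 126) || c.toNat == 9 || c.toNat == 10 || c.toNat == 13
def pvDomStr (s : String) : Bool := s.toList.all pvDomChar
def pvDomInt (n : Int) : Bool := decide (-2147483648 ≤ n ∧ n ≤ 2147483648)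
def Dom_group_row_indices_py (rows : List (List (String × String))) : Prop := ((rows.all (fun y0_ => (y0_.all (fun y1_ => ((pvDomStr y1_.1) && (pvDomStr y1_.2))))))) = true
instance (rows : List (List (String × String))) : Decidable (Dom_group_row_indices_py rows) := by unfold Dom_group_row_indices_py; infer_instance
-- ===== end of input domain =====

-- B replaces A's per-group sorts by one global stable sort of all row indices followed by a single distributing pass (alternative decomposition; equal output, including key order, proved).


-- ===== PORT A =====
-- row.get(k, "") on a Python dict (assoc list, first match); str(·) is the identity on these string values
def pvRowGetA (row : List (String × String)) (k : String) : String :=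
  (PySem.Dict.mk row).getD k ""

def group_row_indices_py (rows : List (List (String × String))) : List (String × String × List Int) :=
  let groups : PySem.Dict (String × String) (List Int) :=
    (PySem.List.enumerate rows).foldl
      (fun d p => d.modify (pvRowGetA p.2 "sample_id", pvRowGetA p.2 "parent_node_id") [] (· ++ [p.1]))
      PySem.Dict.empty
  let ordered : PySem.Dict (String × String) (List Int) :=
    groups.items.foldl
      (fun d kv => d.insert kv.1
        (PySem.List.sorted kv.2 (fun i => pvRowGetA (PySem.List.pyGetD rows i []) "child_node_id") false))
      PySem.Dict.empty
  ordered.items.map (fun kv => (kv.1.1, kv.1.2, kv.2))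

-- ===== PORT B =====
-- (B uses the same row.get(k, "") helper, pvRowGetA)
def group_row_indices_py_alt (rows : List (List (String × String))) : List (String × String × List Int) :=
  let order : List Int :=
    PySem.List.sorted (PySem.List.pyRange 0 (PySem.List.len rows) 1)
      (fun i => pvRowGetA (PySem.List.pyGetD rows i []) "child_node_id") false
  let out0 : PySem.Dict (String × String) (List Int) :=
    rows.foldl
      (fun d row =>
        let key := (pvRowGetA row "sample_id", pvRowGetA row "parent_node_id")
        if d.contains key then d else d.insert key [])
      PySem.Dict.empty
  let out : PySem.Dict (String × String) (List Int) :=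
    order.foldl
      (fun d i =>
        let row := PySem.List.pyGetD rows i []
        d.modify (pvRowGetA row "sample_id", pvRowGetA row "parent_node_id") [] (· ++ [i]))
      out0
  out.items.map (fun kv => (kv.1.1, kv.1.2, kv.2))

-- ===== PRECONDITION & SPEC =====
def Spec_group_row_indices_py (rows : List (List (String × String))) (out : List (String × String × List Int)) : Prop := out = group_row_indices_py_alt rows
instance (rows : List (List (String × String))) (out : List (String × String × List Int)) : Decidable (Spec_group_row_indices_py rows out) := by unfold Spec_group_row_indices_py; infer_instance

-- ===== CLAIM (what is proved, stated in full; the proofs are below) =====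
def Claim_equal_group_row_indices_py : Prop := ∀ (rows : List (List (String × String))), Dom_group_row_indices_py rows → Spec_group_row_indices_py rows (group_row_indices_py rows)

-- ===== LEMMAS AND PROOFS =====

-- pure model of "append the key if it is new"
def pvStep {κ : Type} [DecidableEq κ] (ks : List κ) (k : κ) : List κ :=
  if k ∈ ks then ks else ks ++ [k]

-- the (sample_id, parent_node_id) key of a row / of row index i, and the child-id sort key
def pvKr (row : List (String × String)) : String × String :=
  (pvRowGetA row "sample_id", pvRowGetA row "parent_node_id")
def pvK (rows : List (List (String × String))) (i : Int) : String × String :=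
  pvKr (PySem.List.pyGetD rows i [])
def pvC (rows : List (List (String × String))) (i : Int) : String :=
  pvRowGetA (PySem.List.pyGetD rows i []) "child_node_id"
-- first-occurrence key list and the group of a key
def pvKeyList (rows : List (List (String × String))) : List (String × String) :=
  (rows.map pvKr).foldl pvStep []
def pvGrp (rows : List (List (String × String))) (k : String × String) : List Int :=
  (PySem.List.pyRange 0 (PySem.List.len rows) 1).filter (fun i => pvK rows i == k)

theorem pv_insertBy_nil {α : Type} (b : α → α → Bool) (x : α) :
    PySem.List.insertBy b x [] = [x] := rfl

theorem pv_insertBy_cons {α : Type} (b : α → α → Bool) (x y : α) (ys : List α) :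
    PySem.List.insertBy b x (y :: ys) = if b x y then x :: y :: ys else y :: PySem.List.insertBy b x ys := rfl

theorem pv_insertBy_head {α κ : Type} [LinearOrder κ] (key : α → κ) (x : α) (l : List α)
    (h : ∀ z ∈ l, key x < key z) :
    PySem.List.insertBy (fun a b => decide (key a < key b)) x l = x :: l := by
  cases l with
  | nil => rfl
  | cons y ys => rw [pv_insertBy_cons]; simp [h y (List.mem_cons_self)]

-- filtering commutes with insertion into a key-sorted list
theorem pv_filter_insertBy {α κ : Type} [LinearOrder κ] (key : α → κ) (p : α → Bool) (x : α)
    (s : List α) (hs : s.Pairwise (fun a b => key a ≤ key b)) :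
    (PySem.List.insertBy (fun a b => decide (key a < key b)) x s).filter p =
      if p x then PySem.List.insertBy (fun a b => decide (key a < key b)) x (s.filter p)
      else s.filter p := by
  induction s with
  | nil => rw [pv_insertBy_nil]; by_cases hp : p x <;> simp [hp, pv_insertBy_nil]
  | cons y t ih =>
    rcases List.pairwise_cons.mp hs with ⟨hy, ht⟩
    rw [pv_insertBy_cons]
    by_cases hlt : key x < key y
    · simp only [hlt, decide_true, if_true]
      by_cases hp : p x
      · have hhead : ∀ z ∈ (y :: t).filter p, key x < key z := by
          intro z hz
          have hz' := List.mem_of_mem_filter hz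
          rcases List.mem_cons.mp hz' with h | h
          · subst h; exact hlt
          · exact lt_of_lt_of_le hlt (hy z h)
        rw [pv_insertBy_head key x _ hhead]
        simp [hp]
      · simp [hp]
    · simp only [hlt, decide_false, List.filter_cons]
      by_cases hp : p x <;> by_cases hpy : p y <;>
        simp [hp, hpy, pv_insertBy_cons, hlt, ih ht]

-- filtering commutes with Python's stable sort
theorem pv_filter_sorted {α κ : Type} [LinearOrder κ] (key : α → κ) (p : α → Bool) (xs : List α) :
    (PySem.List.sorted xs key false).filter p = PySem.List.sorted (xs.filter p) key false := by
  induction xs using List.reverseRecOn with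
  | nil => rfl
  | append_singleton xs x ih =>
    rw [PySem.List.sorted_eq_foldl_insertBy, List.foldl_append, ← PySem.List.sorted_eq_foldl_insertBy]
    rw [List.foldl_cons, List.foldl_nil]
    rw [pv_filter_insertBy key p x _ (PySem.List.sorted_pairwise xs key)]
    rw [List.filter_append, ih]
    by_cases hp : p x
    · simp only [hp, if_true, List.filter_cons, List.filter_nil]
      rw [PySem.List.sorted_eq_foldl_insertBy (xs.filter p ++ [x]), List.foldl_append,
        ← PySem.List.sorted_eq_foldl_insertBy]
      simp
    · simp [hp]

theorem pv_keys_insert {κ ν : Type} [BEq κ] [LawfulBEq κ] (d : PySem.Dict κ ν) (k : κ) (v : ν) :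
    (d.insert k v).keys = if d.contains k then d.keys else d.keys ++ [k] := by
  simp only [PySem.Dict.keys, PySem.Dict.items_insert]
  split
  · rw [List.map_map]
    apply List.map_congr_left
    intro p _
    by_cases h : p.1 == k
    · simp [eq_of_beq h]
    · simp [h]
  · simp

-- lookup after a modify-append fold: the old value plus the matching indices, in order
theorem pv_getD_foldl_modify {κ : Type} [BEq κ] [LawfulBEq κ] [DecidableEq κ] (f : Int → κ)
    (L : List Int) (d : PySem.Dict κ (List Int)) (k : κ) :
    ((L.foldl (fun d i => d.modify (f i) [] (· ++ [i])) d).getD k []) =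
      d.getD k [] ++ L.filter (fun i => f i == k) := by
  induction L generalizing d with
  | nil => simp
  | cons i t ih =>
    rw [List.foldl_cons, ih, List.filter_cons, PySem.Dict.modify, PySem.Dict.getD_insert]
    by_cases h : f i = k
    · simp [h]
    · have h' : ¬ (k = f i) := fun he => h he.symm
      simp [h, h']

-- keys of a modify-append fold = the pure first-occurrence fold over the key images
theorem pv_keys_foldl_modify {κ : Type} [BEq κ] [LawfulBEq κ] [DecidableEq κ] (f : Int → κ)
    (L : List Int) (d : PySem.Dict κ (List Int)) :
    (L.foldl (fun d i => d.modify (f i) [] (· ++ [i])) d).keys =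
      (L.map f).foldl pvStep d.keys := by
  induction L generalizing d with
  | nil => rfl
  | cons i t ih =>
    rw [List.foldl_cons, ih, List.map_cons, List.foldl_cons, PySem.Dict.modify, pv_keys_insert,
      pvStep]
    by_cases h : f i ∈ d.keys
    · rw [if_pos ((PySem.Dict.contains_iff_mem_keys d (f i)).mpr h), if_pos h]
    · rw [if_neg (fun hc => h ((PySem.Dict.contains_iff_mem_keys d (f i)).mp hc)), if_neg h]

-- keys of B's seeding fold = the same pure first-occurrence fold
theorem pv_keys_foldl_seed {κ α : Type} [BEq κ] [LawfulBEq κ] [DecidableEq κ] (f : α → κ)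
    (L : List α) (d : PySem.Dict κ (List Int)) :
    (L.foldl (fun d a => if d.contains (f a) then d else d.insert (f a) []) d).keys =
      (L.map f).foldl pvStep d.keys := by
  induction L generalizing d with
  | nil => rfl
  | cons a t ih =>
    rw [List.foldl_cons, ih, List.map_cons, List.foldl_cons, pvStep]
    by_cases h : f a ∈ d.keys
    · rw [if_pos ((PySem.Dict.contains_iff_mem_keys d (f a)).mpr h), if_pos h]
    · rw [if_neg (fun hc => h ((PySem.Dict.contains_iff_mem_keys d (f a)).mp hc)), if_neg h,
        pv_keys_insert, if_neg (fun hc => h ((PySem.Dict.contains_iff_mem_keys d (f a)).mp hc))]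

-- every value of B's seeding dict is []
theorem pv_getD_foldl_seed {κ α : Type} [BEq κ] [LawfulBEq κ] [DecidableEq κ] (f : α → κ)
    (L : List α) (d : PySem.Dict κ (List Int)) (k : κ) (h : d.getD k [] = []) :
    ((L.foldl (fun d a => if d.contains (f a) then d else d.insert (f a) []) d).getD k []) = [] := by
  induction L generalizing d with
  | nil => exact h
  | cons a t ih =>
    rw [List.foldl_cons]
    apply ih
    split
    · exact h
    · rw [PySem.Dict.getD_insert]
      split <;> simp [h]

theorem pv_nodup_keyfold {κ : Type} [DecidableEq κ] (L : List κ) (ks0 : List κ) (h : ks0.Nodup) :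
    (L.foldl pvStep ks0).Nodup := by
  induction L generalizing ks0 with
  | nil => exact h
  | cons k t ih =>
    rw [List.foldl_cons, pvStep]
    split
    · exact ih ks0 h
    · rename_i hk
      refine ih _ ?_
      rw [List.nodup_append]
      exact ⟨h, List.nodup_singleton _, fun a ha b hb => by rw [List.mem_singleton] at hb; exact fun he => hk ((hb ▸ he) ▸ ha)⟩

theorem pv_mem_keyfold {κ : Type} [DecidableEq κ] (L : List κ) (ks0 : List κ) (k : κ)
    (h : k ∈ ks0 ∨ k ∈ L) : k ∈ L.foldl pvStep ks0 := by
  induction L generalizing ks0 with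
  | nil => simpa using h
  | cons a t ih =>
    rw [List.foldl_cons, pvStep]
    rcases h with h | h
    · split
      · exact ih _ (Or.inl h)
      · exact ih _ (Or.inl (by simp [h]))
    · rcases List.mem_cons.mp h with h | h
      · subst h
        split
        · exact ih _ (Or.inl (by assumption))
        · exact ih _ (Or.inl (by simp))
      · exact ih _ (Or.inr h)

theorem pv_keyfold_of_subset {κ : Type} [DecidableEq κ] (L : List κ) (ks0 : List κ)
    (h : ∀ k ∈ L, k ∈ ks0) : L.foldl pvStep ks0 = ks0 := by
  induction L with
  | nil => rfl
  | cons a t ih =>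
    rw [List.foldl_cons, pvStep, if_pos (h a (List.mem_cons_self))]
    exact ih (fun k hk => h k (List.mem_cons_of_mem a hk))

-- a dict with Nodup keys is its key list paired with its lookups
theorem pv_mk_items_eq {κ ν : Type} [BEq κ] [LawfulBEq κ] (l : List (κ × ν))
    (h : (l.map (·.1)).Nodup) (dflt : ν) :
    l = (l.map (·.1)).map (fun k => (k, (PySem.Dict.mk l).getD k dflt)) := by
  induction l with
  | nil => rfl
  | cons kv t ih =>
    rcases List.pairwise_cons.mp h with ⟨hhead, htail⟩
    have h1 : (PySem.Dict.mk (kv :: t)).getD kv.1 dflt = kv.2 := by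
      have hf : List.find? (fun p => p.1 == kv.1) (kv :: t) = some kv :=
        List.find?_cons_of_pos (by simp)
      simp [PySem.Dict.getD, PySem.Dict.get?, hf]
    have h2 : List.map (fun k => (k, (PySem.Dict.mk (kv :: t)).getD k dflt)) (t.map (·.1))
        = List.map (fun k => (k, (PySem.Dict.mk t).getD k dflt)) (t.map (·.1)) := by
      apply List.map_congr_left
      intro k' hk'
      have hne : kv.1 ≠ k' := hhead k' hk'
      have hf : List.find? (fun p => p.1 == k') (kv :: t) = List.find? (fun p => p.1 == k') t :=
        List.find?_cons_of_neg (by simp [hne])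
      simp [PySem.Dict.getD, PySem.Dict.get?, hf]
    rw [List.map_cons, List.map_cons, h1, h2, ← ih htail]

theorem pv_items_eq_keys_map {κ ν : Type} [BEq κ] [LawfulBEq κ] (d : PySem.Dict κ ν)
    (h : d.keys.Nodup) (dflt : ν) :
    d.items = d.keys.map (fun k => (k, d.getD k dflt)) := by
  cases d with
  | mk l => exact pv_mk_items_eq l h dflt

-- A's second loop: inserting fresh, Nodup keys appends in order
theorem pv_foldl_insert_fresh {κ ν : Type} [BEq κ] [LawfulBEq κ] (l : List (κ × List Int))
    (g : κ × List Int → ν) (d : PySem.Dict κ ν)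
    (hfresh : ∀ kv ∈ l, d.contains kv.1 = false) (hnd : (l.map (·.1)).Nodup) :
    (l.foldl (fun d kv => d.insert kv.1 (g kv)) d).items =
      d.items ++ l.map (fun kv => (kv.1, g kv)) := by
  induction l generalizing d with
  | nil => simp
  | cons kv t ih =>
    rcases List.pairwise_cons.mp hnd with ⟨hhead, htail⟩
    rw [List.foldl_cons]
    have hfr : ∀ kv' ∈ t, (d.insert kv.1 (g kv)).contains kv'.1 = false := by
      intro kv' hkv'
      rw [PySem.Dict.contains_insert]
      have hne : kv'.1 ≠ kv.1 := fun he => (hhead kv'.1 (List.mem_map_of_mem hkv')) he.symm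
      simp [hne, hfresh kv' (List.mem_cons_of_mem kv hkv')]
    rw [ih _ hfr htail, PySem.Dict.items_insert, if_neg (by simp [hfresh kv List.mem_cons_self])]
    simp

theorem pv_maps_eq (rows : List (List (String × String))) :
    (PySem.List.pyRange 0 (PySem.List.len rows) 1).map (pvK rows) = rows.map pvKr := by
  have h := PySem.List.map_pyGetD_pyRange_zero rows []
  calc (PySem.List.pyRange 0 (PySem.List.len rows) 1).map (pvK rows)
      = ((PySem.List.pyRange 0 (PySem.List.len rows) 1).map
          (fun j => PySem.List.pyGetD rows j [])).map pvKr := by rw [List.map_map]; rfl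
    _ = rows.map pvKr := by rw [h]

-- A's result in closed form: first-occurrence keys, each group filtered out and sorted
theorem pvA_eq (rows : List (List (String × String))) :
    group_row_indices_py rows =
      (pvKeyList rows).map
        (fun k => (k.1, k.2, PySem.List.sorted (pvGrp rows k) (pvC rows) false)) := by
  have hA : group_row_indices_py rows =
      (((PySem.List.enumerate rows).foldl
          (fun d p => d.modify (pvKr p.2) [] (· ++ [p.1])) PySem.Dict.empty).items.foldl
        (fun d kv => d.insert kv.1 (PySem.List.sorted kv.2 (pvC rows) false))
          PySem.Dict.empty).items.map (fun kv => (kv.1.1, kv.1.2, kv.2)) := rfl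
  rw [hA, PySem.List.enumerate_eq_map_pyRange rows [], List.foldl_map]
  have hG : (PySem.List.pyRange 0 (PySem.List.len rows) 1).foldl
      (fun d j => d.modify (pvKr (PySem.List.pyGetD rows j [])) [] (· ++ [j]))
      PySem.Dict.empty
    = (PySem.List.pyRange 0 (PySem.List.len rows) 1).foldl
      (fun d i => d.modify (pvK rows i) [] (· ++ [i])) PySem.Dict.empty := rfl
  rw [hG]
  set L := PySem.List.pyRange 0 (PySem.List.len rows) 1 with hLdef
  set G := L.foldl (fun d i => d.modify (pvK rows i) [] (· ++ [i])) PySem.Dict.empty with hGdef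
  have hkeys : G.keys = pvKeyList rows := by
    rw [hGdef, pv_keys_foldl_modify, pv_maps_eq]; rfl
  have hnd : G.keys.Nodup := by
    rw [hkeys, pvKeyList]; exact pv_nodup_keyfold _ _ List.nodup_nil
  have hval : ∀ k, G.getD k [] = pvGrp rows k := by
    intro k
    rw [hGdef, pv_getD_foldl_modify, PySem.Dict.getD_empty, List.nil_append]; rfl
  have hitems : G.items = (pvKeyList rows).map (fun k => (k, pvGrp rows k)) := by
    rw [pv_items_eq_keys_map G hnd [], hkeys]
    exact List.map_congr_left (fun k _ => by rw [hval k])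
  have hfmap : G.items.map (fun kv : (String × String) × List Int => kv.1) = G.keys := rfl
  rw [pv_foldl_insert_fresh G.items
      (fun kv => PySem.List.sorted kv.2 (pvC rows) false) PySem.Dict.empty
      (fun kv _ => rfl) (hfmap ▸ hnd)]
  have he : (PySem.Dict.empty : PySem.Dict (String × String) (List Int)).items = [] := rfl
  rw [hitems, List.map_map, he, List.nil_append, List.map_map]
  rfl

-- B's result in closed form: the same keys, each group filtered out of the one global sort
theorem pvB_eq (rows : List (List (String × String))) :
    group_row_indices_py_alt rows =
      (pvKeyList rows).map
        (fun k => (k.1, k.2,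
          (PySem.List.sorted (PySem.List.pyRange 0 (PySem.List.len rows) 1) (pvC rows)
            false).filter (fun i => pvK rows i == k))) := by
  have hB : group_row_indices_py_alt rows =
      ((PySem.List.sorted (PySem.List.pyRange 0 (PySem.List.len rows) 1) (pvC rows)
          false).foldl (fun d i => d.modify (pvK rows i) [] (· ++ [i]))
        (rows.foldl (fun d row => if d.contains (pvKr row) then d else d.insert (pvKr row) [])
          PySem.Dict.empty)).items.map (fun kv => (kv.1.1, kv.1.2, kv.2)) := rfl
  rw [hB]
  set L := PySem.List.pyRange 0 (PySem.List.len rows) 1 with hLdef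
  set order := PySem.List.sorted L (pvC rows) false with horder
  set d0 := rows.foldl (fun d row => if d.contains (pvKr row) then d else d.insert (pvKr row) [])
    PySem.Dict.empty with hd0
  set F := order.foldl (fun d i => d.modify (pvK rows i) [] (· ++ [i])) d0 with hF
  have hk0 : d0.keys = pvKeyList rows := by
    rw [hd0, pv_keys_foldl_seed]; rfl
  have hsub : ∀ k ∈ order.map (pvK rows), k ∈ d0.keys := by
    intro k hk
    rcases List.mem_map.mp hk with ⟨i, hi, hik⟩
    rw [horder, PySem.List.mem_sorted] at hi
    have hir : PySem.Raise.InRange rows.length i := by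
      rw [hLdef, PySem.List.mem_pyRange_one] at hi
      constructor <;> [omega; exact hi.2]
    have hmem : PySem.List.pyGetD rows i [] ∈ rows := PySem.List.pyGetD_mem rows [] hir
    rw [hk0, pvKeyList]
    exact pv_mem_keyfold _ _ _ (Or.inr (List.mem_map.mpr ⟨_, hmem, hik⟩))
  have hkeys : F.keys = pvKeyList rows := by
    rw [hF, pv_keys_foldl_modify, pv_keyfold_of_subset _ _ hsub, hk0]
  have hnd : F.keys.Nodup := by
    rw [hkeys, pvKeyList]; exact pv_nodup_keyfold _ _ List.nodup_nil
  have hval : ∀ k, F.getD k [] = order.filter (fun i => pvK rows i == k) := by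
    intro k
    rw [hF, pv_getD_foldl_modify]
    rw [pv_getD_foldl_seed pvKr rows PySem.Dict.empty k (PySem.Dict.getD_empty k []),
      List.nil_append]
  have hitems : F.items
      = (pvKeyList rows).map (fun k => (k, order.filter (fun i => pvK rows i == k))) := by
    rw [pv_items_eq_keys_map F hnd [], hkeys]
    exact List.map_congr_left (fun k _ => by rw [hval k])
  rw [hitems, List.map_map]
  rfl

-- ===== VERDICT (by name: the statement is the Claim_ definition above) =====
theorem group_row_indices_py_spec : Claim_equal_group_row_indices_py := by
  intro rows _
  show group_row_indices_py rows = group_row_indices_py_alt rows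
  rw [pvA_eq, pvB_eq]
  refine List.map_congr_left (fun k _ => ?_)
  rw [pv_filter_sorted (pvC rows) (fun i => pvK rows i == k)
    (PySem.List.pyRange 0 (PySem.List.len rows) 1)]
  rfl
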